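-- pv_equiv track=rewrite | github.com/Yyote/tex_math_to_word | latex_to_word.py | skip_latex_preamble
-- ===== SOURCE A (Python) =====
-- def skip_latex_preamble(content):
--     r"""
--     Skip LaTeX document preamble (everything before \begin{document} or \section).
--
--     Args:
--         content (str): LaTeX content as string
--
--     Returns:
--         str: Content starting from main content
--     """
--     # Look for \begin{document}
--     doc_start = content.find(r'\begin{document}')
--     if doc_start != -1:
--         return content[doc_start + len(r'\begin{document}'):]
--
--     # If no \begin{document}, look for first \section, \chapter, etc.
--     section_patterns = [r'\section{', r'\chapter{', r'\part{', r'\subsection{']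
--     earliest_pos = len(content)
--
--     for pattern in section_patterns:
--         pos = content.find(pattern)
--         if pos != -1 and pos < earliest_pos:
--             earliest_pos = pos
--
--     if earliest_pos < len(content):
--         return content[earliest_pos:]
--
--     return content
-- ===== SOURCE B (Python) =====
-- def skip_latex_preamble(content):
--     r"""Skip LaTeX preamble (everything before \begin{document} or the first sectioning command)."""
--     marker = '\\begin{document}'
--     i = content.find(marker)
--     if i != -1:
--         return content[i + len(marker):]
--     patterns = ('\\section{', '\\chapter{', '\\part{', '\\subsection{')
--     for j in range(len(content)):
--         if content.startswith(patterns, j):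
--             return content[j:]
--     return content
-- ===== Notes on version B (the rewrite author's own statement) =====
-- stated objective: idiomatic
-- what changed: Replaces the four separate content.find scans plus the running-minimum loop by one left-to-right scan that returns at the first position where content.startswith any of the four patterns (startswith with a tuple), which is exactly the earliest occurrence.
import Mathlib
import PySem

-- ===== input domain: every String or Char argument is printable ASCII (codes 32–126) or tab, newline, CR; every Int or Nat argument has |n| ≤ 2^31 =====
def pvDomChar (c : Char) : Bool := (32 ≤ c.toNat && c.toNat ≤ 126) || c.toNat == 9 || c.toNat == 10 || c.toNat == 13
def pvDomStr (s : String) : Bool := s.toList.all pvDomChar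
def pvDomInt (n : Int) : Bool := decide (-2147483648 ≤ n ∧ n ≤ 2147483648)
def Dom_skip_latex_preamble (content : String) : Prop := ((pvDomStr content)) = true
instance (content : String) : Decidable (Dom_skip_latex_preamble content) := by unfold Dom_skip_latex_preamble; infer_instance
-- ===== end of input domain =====

-- B is the same task written the idiomatic way: one left-to-right scan that stops at the
-- first position where any sectioning pattern starts (startswith with a tuple), replacing
-- A's four separate find scans plus the running-minimum loop.

-- ===== PORT A =====
-- the four sectioning patterns (A's local `section_patterns`; B's tuple `patterns` is the same literal)
def pvSectionPatterns : List String := ["\\section{", "\\chapter{", "\\part{", "\\subsection{"]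

def skip_latex_preamble (content : String) : String :=
  let docStart := PySem.Str.find content "\\begin{document}"
  if docStart ≠ -1 then
    -- content[doc_start + 16:]  (16 = len(r'\begin{document}'))
    PySem.Str.slice content (some (docStart + 16)) none
  else
    let earliest := pvSectionPatterns.foldl
      (fun earliest pat =>
        let pos := PySem.Str.find content pat
        if pos ≠ -1 ∧ pos < earliest then pos else earliest)
      (PySem.Str.len content)
    if earliest < PySem.Str.len content then
      PySem.Str.slice content (some earliest) none
    else content

-- ===== PORT B =====
-- content.startswith(patterns, j) on the remaining characters
def pvHit (rest : List Char) : Bool :=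
  pvSectionPatterns.any (fun p => p.toList.isPrefixOf rest)

-- the 'for j in range(len(content))' scan: first j with a hit
def pvScan : List Char → Nat → Option Nat
  | [], _ => none
  | c :: rest, j => if pvHit (c :: rest) then some j else pvScan rest (j + 1)

def skip_latex_preamble_alt (content : String) : String :=
  let i := PySem.Str.find content "\\begin{document}"
  if i ≠ -1 then
    PySem.Str.slice content (some (i + 16)) none
  else
    match pvScan content.toList 0 with
    | some j => PySem.Str.slice content (some (j : Int)) none
    | none => content

-- ===== PRECONDITION & SPEC =====
def Spec_skip_latex_preamble (content : String) (out : String) : Prop := out = skip_latex_preamble_alt content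
instance (content : String) (out : String) : Decidable (Spec_skip_latex_preamble content out) := by unfold Spec_skip_latex_preamble; infer_instance

-- ===== CLAIM (what is proved, stated in full; the proofs are below) =====
def Claim_equal_skip_latex_preamble : Prop := ∀ (content : String), Dom_skip_latex_preamble content → Spec_skip_latex_preamble content (skip_latex_preamble content)

-- ===== LEMMAS AND PROOFS =====

lemma pvHit_iff (rest : List Char) :
    pvHit rest = true ↔ ∃ p ∈ pvSectionPatterns, p.toList <+: rest := by
  simp [pvHit, List.any_eq_true, List.isPrefixOf_iff_prefix]

lemma pvScan_none {s : List Char} {j : Nat} (h : pvScan s j = none) :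
    ∀ i, pvHit (s.drop i) = false := by
  induction s generalizing j with
  | nil => intro i; simp; decide
  | cons c rest ih =>
    intro i
    rw [pvScan] at h
    by_cases hh : pvHit (c :: rest) = true
    · simp [hh] at h
    · simp [hh] at h
      cases i with
      | zero => simpa using (Bool.eq_false_iff.mpr hh)
      | succ i' => simpa using ih h i'

lemma pvScan_some {s : List Char} {j k : Nat} (h : pvScan s j = some k) :
    j ≤ k ∧ k - j < s.length ∧ pvHit (s.drop (k - j)) = true ∧
      ∀ i < k - j, pvHit (s.drop i) = false := by
  induction s generalizing j with
  | nil => simp [pvScan] at h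
  | cons c rest ih =>
    rw [pvScan] at h
    by_cases hh : pvHit (c :: rest) = true
    · simp [hh] at h
      subst h
      refine ⟨le_refl _, by simp, by simpa using hh, by omega⟩
    · simp [hh] at h
      obtain ⟨h1, h2, h3, h4⟩ := ih h
      refine ⟨by omega, by simp; omega, ?_, ?_⟩
      · have : k - j = (k - (j + 1)) + 1 := by omega
        rw [this]; simpa using h3
      · intro i hi
        cases i with
        | zero => simpa using (Bool.eq_false_iff.mpr hh)
        | succ i' =>
          have : i' < k - (j + 1) := by omega
          simpa using h4 i' this

-- invariant of A's running-minimum fold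
lemma pvFold_spec (content : String) (ps : List String) (init : Int) :
    (ps.foldl (fun earliest pat =>
        let pos := PySem.Str.find content pat
        if pos ≠ -1 ∧ pos < earliest then pos else earliest) init) ≤ init ∧
    ((ps.foldl (fun earliest pat =>
        let pos := PySem.Str.find content pat
        if pos ≠ -1 ∧ pos < earliest then pos else earliest) init) = init ∨
      ∃ pat ∈ ps, PySem.Str.find content pat =
        (ps.foldl (fun earliest pat =>
          let pos := PySem.Str.find content pat
          if pos ≠ -1 ∧ pos < earliest then pos else earliest) init) ∧
        (ps.foldl (fun earliest pat =>
          let pos := PySem.Str.find content pat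
          if pos ≠ -1 ∧ pos < earliest then pos else earliest) init) ≠ -1) ∧
    (∀ pat ∈ ps, PySem.Str.find content pat ≠ -1 →
      (ps.foldl (fun earliest pat =>
        let pos := PySem.Str.find content pat
        if pos ≠ -1 ∧ pos < earliest then pos else earliest) init) ≤ PySem.Str.find content pat) := by
  induction ps generalizing init with
  | nil => simp
  | cons p rest ih =>
    simp only [List.foldl_cons]
    set init' := (if PySem.Str.find content p ≠ -1 ∧ PySem.Str.find content p < init
      then PySem.Str.find content p else init) with hinit'
    obtain ⟨h1, h2, h3⟩ := ih init'
    have hle : init' ≤ init := by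
      rw [hinit']
      split_ifs with hc
      · exact le_of_lt hc.2
      · exact le_refl init
    refine ⟨le_trans h1 hle, ?_, ?_⟩
    · rcases h2 with h2 | ⟨pat, hm, hfe, hne⟩
      · by_cases hc : PySem.Str.find content p ≠ -1 ∧ PySem.Str.find content p < init
        · right
          refine ⟨p, List.mem_cons_self, ?_, ?_⟩
          · rw [h2, hinit', if_pos hc]
          · rw [h2, hinit', if_pos hc]; exact hc.1
        · left; rw [h2, hinit', if_neg hc]
      · right; exact ⟨pat, List.mem_cons_of_mem _ hm, hfe, hne⟩
    · intro pat hm hne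
      rcases List.mem_cons.mp hm with h | h
      · subst h
        refine le_trans h1 ?_
        rw [hinit']; split_ifs with hc
        · exact le_refl _
        · exact le_of_not_gt (not_and.mp hc hne)
      · exact h3 pat h hne

-- a pattern prefixing a suffix of s occurs in s, so its find is a valid index ≤ that position
lemma pvFind_le_of_prefix_drop {content : String} {p : String} {k : Nat}
    (h : p.toList <+: content.toList.drop k) :
    PySem.Str.find content p ≠ -1 ∧ PySem.Str.find content p ≤ (k : Int) := by
  have hnn : 0 ≤ PySem.Chars.find content.toList p.toList := by
    rw [PySem.Chars.find_nonneg_iff, ← PySem.Chars.isIn_iff_infix,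
      ← PySem.Chars.exists_prefix_drop_iff_isIn]
    exact ⟨k, h⟩
  obtain ⟨_, hmin⟩ := PySem.Chars.find_spec hnn
  have hle : (PySem.Chars.find content.toList p.toList).toNat ≤ k := by
    by_contra hlt
    exact hmin k (by omega) h
  rw [PySem.Str.find_eq]
  constructor
  · omega
  · omega

-- ===== VERDICT (by name: the statement is the Claim_ definition above) =====
theorem skip_latex_preamble_spec : Claim_equal_skip_latex_preamble := by
  intro content _
  unfold Spec_skip_latex_preamble skip_latex_preamble skip_latex_preamble_alt
  by_cases hdoc : PySem.Str.find content "\\begin{document}" ≠ -1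
  · simp only [if_pos hdoc]
  · simp only [if_neg hdoc]
    set r := pvSectionPatterns.foldl (fun earliest pat =>
        let pos := PySem.Str.find content pat
        if pos ≠ -1 ∧ pos < earliest then pos else earliest) (PySem.Str.len content) with hr
    obtain ⟨hle, hor, hmin⟩ := pvFold_spec content pvSectionPatterns (PySem.Str.len content)
    rw [← hr] at hle hor hmin
    cases hscan : pvScan content.toList 0 with
    | none =>
      have hall : ∀ pat ∈ pvSectionPatterns, PySem.Str.find content pat = -1 := by
        intro pat hm
        by_contra hne
        have hnn : 0 ≤ PySem.Chars.find content.toList pat.toList := by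
          rw [PySem.Str.find_eq] at hne
          have := PySem.Chars.neg_one_le_find content.toList pat.toList
          omega
        obtain ⟨hpre, _⟩ := PySem.Chars.find_spec hnn
        have hhit : pvHit (content.toList.drop
            (PySem.Chars.find content.toList pat.toList).toNat) = true := by
          rw [pvHit_iff]; exact ⟨pat, hm, hpre⟩
        rw [pvScan_none hscan] at hhit
        exact Bool.false_ne_true hhit
      have hri : r = PySem.Str.len content := by
        rcases hor with h | ⟨pat, hm, hfe, hne⟩
        · exact h
        · exact absurd (hall pat hm) (by rw [hfe]; exact hne)
      rw [hri, if_neg (lt_irrefl _)]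
    | some k =>
      obtain ⟨_, hklen, hhit, hbefore⟩ := pvScan_some hscan
      simp only [Nat.sub_zero] at hklen hhit hbefore
      -- r = k
      obtain ⟨p, hpm, hppre⟩ := (pvHit_iff _).mp hhit
      obtain ⟨hfne, hfle⟩ := pvFind_le_of_prefix_drop hppre
      have hrk : r ≤ (k : Int) := le_trans (hmin p hpm hfne) hfle
      have hkn : (k : Int) < PySem.Str.len content := by
        rw [PySem.Str.len_eq]; exact_mod_cast hklen
      have hrne : r ≠ PySem.Str.len content := by omega
      rcases hor with h | ⟨pat, hm, hfe, hne⟩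
      · exact absurd h hrne
      · have hnn : 0 ≤ PySem.Chars.find content.toList pat.toList := by
          rw [PySem.Str.find_eq] at hfe
          have := PySem.Chars.neg_one_le_find content.toList pat.toList
          rw [hfe] at *
          omega
        obtain ⟨hpre, _⟩ := PySem.Chars.find_spec hnn
        have hhit2 : pvHit (content.toList.drop
            (PySem.Chars.find content.toList pat.toList).toNat) = true := by
          rw [pvHit_iff]; exact ⟨pat, hm, hpre⟩
        have hge : k ≤ (PySem.Chars.find content.toList pat.toList).toNat := by
          by_contra hlt
          rw [hbefore _ (by omega)] at hhit2
          exact Bool.false_ne_true hhit2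
        have hrk' : (k : Int) ≤ r := by
          rw [← hfe, PySem.Str.find_eq]; omega
        have : r = (k : Int) := le_antisymm hrk hrk'
        rw [this, if_pos hkn]
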